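-- pv_equiv track=rewrite | github.com/sungjunminn/Algorithms-study | HackerRank/Bread.py | solution
-- ===== SOURCE A (Python) =====
-- def solution(x, y, z):
--     k = 0
--     for i in range(z):
--         k += 1
--     if x > y:
--         k = x
--     elif x <= y:
--         k = k + 1
--
--     return k
-- ===== SOURCE B (Python) =====
-- def solution(x, y, z):
--     return x if x > y else max(z, 0) + 1
-- ===== Notes on version B (the rewrite author's own statement) =====
-- stated objective: simpler
-- what changed: Replaces the counting loop over range(z) with the closed form max(z,0)+1 and a conditional expression.
import Mathlib
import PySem

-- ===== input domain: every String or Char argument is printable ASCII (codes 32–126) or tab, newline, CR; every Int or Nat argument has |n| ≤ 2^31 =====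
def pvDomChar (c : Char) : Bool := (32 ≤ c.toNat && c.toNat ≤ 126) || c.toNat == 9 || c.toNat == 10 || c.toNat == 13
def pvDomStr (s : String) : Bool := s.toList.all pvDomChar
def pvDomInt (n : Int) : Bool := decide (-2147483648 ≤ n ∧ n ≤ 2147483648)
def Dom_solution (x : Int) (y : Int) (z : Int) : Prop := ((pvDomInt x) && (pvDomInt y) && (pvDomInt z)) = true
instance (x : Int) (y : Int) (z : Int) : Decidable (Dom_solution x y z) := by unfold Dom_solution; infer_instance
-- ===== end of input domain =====

-- B replaces the counting loop with the closed form max(z,0)+1 (simpler, no loop).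


-- ===== PORT A =====
-- literal port of A: loop k += 1 over range(z), then the branch chain
def solution (x : Int) (y : Int) (z : Int) : Int :=
  let k : Int := (PySem.List.pyRange 0 z 1).foldl (fun k _ => k + 1) 0
  if x > y then x
  else if x ≤ y then k + 1
  else k

-- ===== PORT B =====
-- B: closed form, no loop
def solution_alt (x : Int) (y : Int) (z : Int) : Int :=
  if x > y then x else max z 0 + 1

-- ===== PRECONDITION & SPEC =====
def Spec_solution (x : Int) (y : Int) (z : Int) (out : Int) : Prop := out = solution_alt x y z
instance (x : Int) (y : Int) (z : Int) (out : Int) : Decidable (Spec_solution x y z out) := by unfold Spec_solution; infer_instance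

-- ===== CLAIM (what is proved, stated in full; the proofs are below) =====
def Claim_equal_solution : Prop := ∀ (x : Int) (y : Int) (z : Int), Dom_solution x y z → Spec_solution x y z (solution x y z)

-- ===== LEMMAS AND PROOFS =====

-- ===== VERDICT (by name: the statement is the Claim_ definition above) =====
theorem foldl_count (l : List Int) (k : Int) : l.foldl (fun k _ => k + 1) k = k + l.length := by
  induction l generalizing k with
  | nil => simp
  | cons a t ih => simp [List.foldl, ih]; ring

theorem solution_spec : Claim_equal_solution := by
  intro x y z _
  unfold Spec_solution solution solution_alt
  simp only [foldl_count, PySem.List.length_pyRange_one]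
  split_ifs with h1 h2 <;> omega
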